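-- pv_equiv track=rewrite | github.com/chuanyinn/LeetCode | 2533-number-of-good-binary-strings/2533-number-of-good-binary-strings.py | goodBinaryStrings
-- ===== SOURCE A (Python) =====
-- def goodBinaryStrings(minLength: int, maxLength: int, oneGroup: int, zeroGroup: int) -> int:
--     dp = [0] * (maxLength + 1)
--     dp[0] = 1
--     MOD = 10**9 + 7
--     res = 0
--
--     for i in range(min(oneGroup, zeroGroup), maxLength + 1):
--         if i >= oneGroup:
--             dp[i] = (dp[i] + dp[i - oneGroup]) % MOD
--         if i >= zeroGroup:
--             dp[i] = (dp[i] + dp[i - zeroGroup]) % MOD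
--
--     res = sum(dp[minLength:])
--
--     return res % MOD
-- ===== SOURCE B (Python) =====
-- def goodBinaryStrings(minLength: int, maxLength: int, oneGroup: int, zeroGroup: int) -> int:
--     # Top-down memoized recursion over lengths: count(n) = good strings of length exactly n.
--     # Lengths are visited in increasing order, which keeps the recursion depth constant.
--     MOD = 10**9 + 7
--     memo = {}
--
--     def count(n):
--         if n < 0:
--             return 0
--         if n == 0:
--             return 1
--         if n not in memo:
--             memo[n] = (count(n - oneGroup) + count(n - zeroGroup)) % MOD
--         return memo[n]
--
--     total = 0
--     for n in range(0, maxLength + 1):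
--         c = count(n)
--         if n >= minLength:
--             total = (total + c) % MOD
--     return total
-- ===== Notes on version B (the rewrite author's own statement) =====
-- stated objective: alternative
-- what changed: Replaces A's forward array DP plus tail-slice summation by a top-down memoized recursion count(n) (0 for n<0, 1 for n==0, else (count(n-oneGroup)+count(n-zeroGroup)) % MOD) driven over lengths 0..maxLength with the answer accumulated mod on the fly; Pre_ excludes nonpositive group sizes, where B's recursion does not terminate (RecursionError) while A sometimes returns an accidental value, and negative maxLength, where A raises IndexError.
-- intended difference: For minLength < 0 with -(maxLength+1) < minLength, A's dp[minLength:] wraps from the end of the array and sums only the last lengths (at the witness (-1,2,1,2) A returns 2), while B reads minLength as a lower bound on the length, so lengths below 0 contribute nothing and it sums all lengths from 0 (B returns 4 there), which is the intended meaning of minLength. — e.g. on goodBinaryStrings(-1, 2, 1, 2): A returns 2, B returns 4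
-- outside the precondition, e.g. on goodBinaryStrings(0, 3, 0, 2): A returns 4, B raises RecursionError
import Mathlib
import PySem

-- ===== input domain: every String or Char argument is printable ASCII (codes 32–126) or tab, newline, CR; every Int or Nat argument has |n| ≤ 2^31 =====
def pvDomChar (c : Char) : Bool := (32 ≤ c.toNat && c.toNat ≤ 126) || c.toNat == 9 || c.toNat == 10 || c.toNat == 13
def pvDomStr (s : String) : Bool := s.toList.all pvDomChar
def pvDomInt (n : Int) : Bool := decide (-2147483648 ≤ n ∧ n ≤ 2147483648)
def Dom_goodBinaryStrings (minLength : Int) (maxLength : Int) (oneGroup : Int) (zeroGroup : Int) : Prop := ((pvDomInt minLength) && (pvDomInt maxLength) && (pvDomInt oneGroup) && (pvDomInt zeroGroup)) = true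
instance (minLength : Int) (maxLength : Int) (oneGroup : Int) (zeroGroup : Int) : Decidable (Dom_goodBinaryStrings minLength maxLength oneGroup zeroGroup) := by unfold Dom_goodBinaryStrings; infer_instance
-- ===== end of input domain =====

-- B replaces A's forward array DP + tail-slice sum by top-down memoized recursion over lengths
-- (alternative decomposition, same asymptotic cost); equivalence is about the return value only.

-- ===== PORT A =====
-- dp[i] = v : Python list assignment; raises IndexError outside -len ≤ i < len (unreachable inside
-- Pre_, where the port leaves the array unchanged). The Python list is held as an Array.
def pvASet (xs : Array Int) (i : Int) (v : Int) : Array Int :=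
  let j : Int := if i < 0 then (xs.size : Int) + i else i
  if 0 ≤ j ∧ j < (xs.size : Int) then xs.setIfInBounds j.toNat v else xs

-- dp[i] read; raises IndexError out of range in Python (unreachable inside Pre_, default 0 here)
def pvAGet (xs : Array Int) (i : Int) : Int :=
  let j : Int := if i < 0 then (xs.size : Int) + i else i
  xs.getD j.toNat 0

-- the body of A's for-loop
def pvAStep (oneGroup zeroGroup M : Int) (dp : Array Int) (i : Int) : Array Int :=
  let dp1 := if oneGroup ≤ i then
      pvASet dp i (PySem.Int.mod (pvAGet dp i + pvAGet dp (i - oneGroup)) M)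
    else dp
  if zeroGroup ≤ i then
    pvASet dp1 i (PySem.Int.mod (pvAGet dp1 i + pvAGet dp1 (i - zeroGroup)) M)
  else dp1

def goodBinaryStrings (minLength : Int) (maxLength : Int) (oneGroup : Int) (zeroGroup : Int) : Int :=
  let dp0 := Array.replicate (maxLength + 1).toNat (0 : Int)
  let dp1 := pvASet dp0 0 1
  let M : Int := 10 ^ 9 + 7
  let dp2 := (PySem.List.pyRange (min oneGroup zeroGroup) (maxLength + 1) 1).foldl
      (pvAStep oneGroup zeroGroup M) dp1
  let res := (PySem.List.slice dp2.toList (some minLength) none).sum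
  PySem.Int.mod res M

-- ===== PORT B =====
-- Source B's recursive helper `count`, threading the memo dict; the fuel argument only makes the
-- recursion structural (each call below is made with ample fuel when the groups are positive)
def pvBCount (oneGroup zeroGroup : Int) : Nat → Std.TreeMap Int Int → Int → Int × Std.TreeMap Int Int
  | 0, memo, _ => (0, memo)
  | fuel + 1, memo, n =>
    if n < 0 then (0, memo)
    else if n = 0 then (1, memo)
    else
      match memo[n]? with
      | some v => (v, memo)
      | none =>
        let a := pvBCount oneGroup zeroGroup fuel memo (n - oneGroup)
        let b := pvBCount oneGroup zeroGroup fuel a.2 (n - zeroGroup)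
        let r := PySem.Int.mod (a.1 + b.1) (10 ^ 9 + 7)
        (r, b.2.insert n r)

-- the body of Source B's for-loop: state = (total, memo)
def pvBStep (minLength oneGroup zeroGroup : Int) (st : Int × Std.TreeMap Int Int) (n : Int) :
    Int × Std.TreeMap Int Int :=
  let c := pvBCount oneGroup zeroGroup (n.toNat + 1) st.2 n
  (if minLength ≤ n then PySem.Int.mod (st.1 + c.1) (10 ^ 9 + 7) else st.1, c.2)

def goodBinaryStrings_alt (minLength : Int) (maxLength : Int) (oneGroup : Int) (zeroGroup : Int) : Int :=
  ((PySem.List.pyRange 0 (maxLength + 1) 1).foldl (pvBStep minLength oneGroup zeroGroup)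
      (0, (∅ : Std.TreeMap Int Int))).1

-- ===== PRECONDITION & SPEC =====
-- Pre_ excludes maxLength < 0 (A raises IndexError at dp[0] = 1) and nonpositive group sizes,
-- the natural domain restriction: there B's recursion count(n) = count(n-oneGroup) + … does not
-- terminate (RecursionError), while A raises on most such inputs but returns an accidental value
-- on some (see the cite in claim.json).
def Pre_goodBinaryStrings (minLength : Int) (maxLength : Int) (oneGroup : Int) (zeroGroup : Int) : Prop :=
  0 ≤ maxLength ∧ 1 ≤ oneGroup ∧ 1 ≤ zeroGroup
instance (minLength : Int) (maxLength : Int) (oneGroup : Int) (zeroGroup : Int) : Decidable (Pre_goodBinaryStrings minLength maxLength oneGroup zeroGroup) := by unfold Pre_goodBinaryStrings; infer_instance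

def pvWitness_goodBinaryStrings : Int × Int × Int × Int := (1, 3, 1, 2)

-- For minLength < 0 with -(maxLength+1) < minLength, A's dp[minLength:] wraps from the end of the
-- array and sums only the last lengths, while B reads minLength as a lower bound on the length, so
-- lengths below 0 contribute nothing and it sums all lengths from 0 — the intended meaning of minLength.
def D_goodBinaryStrings (minLength : Int) (maxLength : Int) (oneGroup : Int) (zeroGroup : Int) : Prop :=
  -maxLength - 1 < minLength ∧ minLength ≤ -1
instance (minLength : Int) (maxLength : Int) (oneGroup : Int) (zeroGroup : Int) : Decidable (D_goodBinaryStrings minLength maxLength oneGroup zeroGroup) := by unfold D_goodBinaryStrings; infer_instance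

def Spec_goodBinaryStrings (minLength : Int) (maxLength : Int) (oneGroup : Int) (zeroGroup : Int) (out : Int) : Prop := ¬ D_goodBinaryStrings minLength maxLength oneGroup zeroGroup → out = goodBinaryStrings_alt minLength maxLength oneGroup zeroGroup
instance (minLength : Int) (maxLength : Int) (oneGroup : Int) (zeroGroup : Int) (out : Int) : Decidable (Spec_goodBinaryStrings minLength maxLength oneGroup zeroGroup out) := by unfold Spec_goodBinaryStrings; infer_instance

def pvDiffWitness_goodBinaryStrings : Int × Int × Int × Int := (-1, 2, 1, 2)
def pvDiffWitnessOut_goodBinaryStrings : Int × Int := (2, 4)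

-- ===== CLAIM (what is proved, stated in full; the proofs are below) =====
def Claim_unchanged_goodBinaryStrings : Prop := ∀ (minLength : Int) (maxLength : Int) (oneGroup : Int) (zeroGroup : Int), Dom_goodBinaryStrings minLength maxLength oneGroup zeroGroup → Pre_goodBinaryStrings minLength maxLength oneGroup zeroGroup → Spec_goodBinaryStrings minLength maxLength oneGroup zeroGroup (goodBinaryStrings minLength maxLength oneGroup zeroGroup)
def Claim_changed_goodBinaryStrings : Prop := Dom_goodBinaryStrings (pvDiffWitness_goodBinaryStrings.1) (pvDiffWitness_goodBinaryStrings.2.1) (pvDiffWitness_goodBinaryStrings.2.2.1) (pvDiffWitness_goodBinaryStrings.2.2.2) ∧ Pre_goodBinaryStrings (pvDiffWitness_goodBinaryStrings.1) (pvDiffWitness_goodBinaryStrings.2.1) (pvDiffWitness_goodBinaryStrings.2.2.1) (pvDiffWitness_goodBinaryStrings.2.2.2) ∧ D_goodBinaryStrings (pvDiffWitness_goodBinaryStrings.1) (pvDiffWitness_goodBinaryStrings.2.1) (pvDiffWitness_goodBinaryStrings.2.2.1) (pvDiffWitness_goodBinaryStrings.2.2.2) ∧ goodBinaryStrings (pvDiffWitness_goodBinaryStrings.1)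 (pvDiffWitness_goodBinaryStrings.2.1) (pvDiffWitness_goodBinaryStrings.2.2.1) (pvDiffWitness_goodBinaryStrings.2.2.2) = pvDiffWitnessOut_goodBinaryStrings.1 ∧ goodBinaryStrings_alt (pvDiffWitness_goodBinaryStrings.1) (pvDiffWitness_goodBinaryStrings.2.1) (pvDiffWitness_goodBinaryStrings.2.2.1) (pvDiffWitness_goodBinaryStrings.2.2.2) = pvDiffWitnessOut_goodBinaryStrings.2 ∧ pvDiffWitnessOut_goodBinaryStrings.1 ≠ pvDiffWitnessOut_goodBinaryStrings.2

-- ===== LEMMAS AND PROOFS =====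

-- reference function: pvf og zg n = value the recurrence assigns to length n (fuel-stabilised)
def pvF (og zg : Int) : Nat → Int → Int
  | 0, _ => 0
  | fuel + 1, n =>
    if n < 0 then 0
    else if n = 0 then 1
    else PySem.Int.mod (pvF og zg fuel (n - og) + pvF og zg fuel (n - zg)) (10 ^ 9 + 7)

def pvf (og zg n : Int) : Int := pvF og zg (n.toNat + 1) n


theorem pvF_stable (og zg : Int) (hog : 1 ≤ og) (hzg : 1 ≤ zg) :
    ∀ (f1 f2 : Nat) (n : Int), n < (f1 : Int) → n < (f2 : Int) → pvF og zg f1 n = pvF og zg f2 n := by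
  intro f1
  induction f1 with
  | zero =>
    intro f2 n h1 h2
    have hn : n < 0 := by exact_mod_cast h1
    cases f2 with
    | zero => rfl
    | succ k => simp [pvF, hn]
  | succ f1 ih =>
    intro f2 n h1 h2
    cases f2 with
    | zero =>
      have hn : n < 0 := by exact_mod_cast h2
      simp [pvF, hn]
    | succ k =>
      simp only [pvF]
      by_cases hn : n < 0
      · simp [hn]
      · by_cases h0 : n = 0
        · simp [h0]
        · simp only [if_neg hn, if_neg h0]
          have e1 : pvF og zg f1 (n - og) = pvF og zg k (n - og) :=
            ih k (n - og) (by push_cast at h1 ⊢; omega) (by push_cast at h2 ⊢; omega)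
          have e2 : pvF og zg f1 (n - zg) = pvF og zg k (n - zg) :=
            ih k (n - zg) (by push_cast at h1 ⊢; omega) (by push_cast at h2 ⊢; omega)
          rw [e1, e2]

theorem pvf_eq (og zg : Int) (hog : 1 ≤ og) (hzg : 1 ≤ zg) (fuel : Nat) (n : Int)
    (h : n < (fuel : Int)) : pvF og zg fuel n = pvf og zg n := by
  exact pvF_stable og zg hog hzg fuel (n.toNat + 1) n h (by push_cast; omega)

theorem pvf_neg (og zg n : Int) (h : n < 0) : pvf og zg n = 0 := by
  simp [pvf, pvF, h]

theorem pvf_zero (og zg : Int) : pvf og zg 0 = 1 := by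
  simp [pvf, pvF]

theorem pvf_rec (og zg n : Int) (hog : 1 ≤ og) (hzg : 1 ≤ zg) (h : 0 < n) :
    pvf og zg n = PySem.Int.mod (pvf og zg (n - og) + pvf og zg (n - zg)) (10 ^ 9 + 7) := by
  have hn0 : ¬ n < 0 := by omega
  have hne : n ≠ 0 := by omega
  conv_lhs => rw [pvf, pvF]
  rw [if_neg hn0, if_neg hne,
    pvf_eq og zg hog hzg n.toNat (n - og) (by omega),
    pvf_eq og zg hog hzg n.toNat (n - zg) (by omega)]

theorem pvf_bounds (og zg n : Int) (hog : 1 ≤ og) (hzg : 1 ≤ zg) :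
    0 ≤ pvf og zg n ∧ pvf og zg n < 10 ^ 9 + 7 := by
  rcases lt_trichotomy n 0 with h | h | h
  · rw [pvf_neg og zg n h]; norm_num
  · subst h; rw [pvf_zero]; norm_num
  · rw [pvf_rec og zg n hog hzg h]
    exact ⟨PySem.Int.mod_nonneg _ (by norm_num), PySem.Int.mod_lt _ (by norm_num)⟩


-- ---- B side: the memo dict only ever stores correct values ----
def pvBInv (og zg : Int) (memo : Std.TreeMap Int Int) : Prop :=
  ∀ m v, memo[m]? = some v → v = pvf og zg m

theorem pvBCount_spec (og zg : Int) (hog : 1 ≤ og) (hzg : 1 ≤ zg) :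
    ∀ (fuel : Nat) (memo : Std.TreeMap Int Int) (n : Int), n < (fuel : Int) → pvBInv og zg memo →
      (pvBCount og zg fuel memo n).1 = pvf og zg n ∧ pvBInv og zg (pvBCount og zg fuel memo n).2 := by
  intro fuel
  induction fuel with
  | zero =>
    intro memo n h hInv
    have hn : n < 0 := by exact_mod_cast h
    exact ⟨(pvf_neg og zg n hn).symm, hInv⟩
  | succ fuel ih =>
    intro memo n h hInv
    by_cases hn : n < 0
    · simp only [pvBCount, if_pos hn]
      exact ⟨(pvf_neg og zg n hn).symm, hInv⟩
    · by_cases h0 : n = 0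
      · subst h0
        simp only [pvBCount]
        norm_num
        exact ⟨(pvf_zero og zg).symm, hInv⟩
      · rcases hget : memo[n]? with _ | v
        · have ha := ih memo (n - og) (by push_cast at h ⊢; omega) hInv
          have hb := ih (pvBCount og zg fuel memo (n - og)).2 (n - zg) (by push_cast at h ⊢; omega) ha.2
          simp only [pvBCount, if_neg hn, if_neg h0, hget]
          constructor
          · rw [ha.1, hb.1]
            exact (pvf_rec og zg n hog hzg (by omega)).symm
          · intro m v hv
            rw [Std.TreeMap.getElem?_insert] at hv
            split at hv
            · rename_i hm
              have hmn : n = m := compare_eq_iff_eq.mp hm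
              rw [ha.1, hb.1] at hv
              injection hv with hv
              rw [← hv, ← hmn]
              exact (pvf_rec og zg n hog hzg (by omega)).symm
            · exact hb.2 m v hv
        · simp only [pvBCount, if_neg hn, if_neg h0, hget]
          exact ⟨hInv n v hget, hInv⟩

-- (a % M + b) % M = (a + b) % M for Python mod with the positive modulus M
theorem pvMod_add_left (a b : Int) :
    PySem.Int.mod (PySem.Int.mod a (10 ^ 9 + 7) + b) (10 ^ 9 + 7) = PySem.Int.mod (a + b) (10 ^ 9 + 7) := by
  simp only [PySem.Int.mod_eq_emod_of_pos (show (0:Int) < 10 ^ 9 + 7 by norm_num)]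
  exact Int.emod_add_emod a (10 ^ 9 + 7) b

theorem pvMod_self (a : Int) (h0 : 0 ≤ a) (h1 : a < 10 ^ 9 + 7) :
    PySem.Int.mod a (10 ^ 9 + 7) = a := by
  rw [PySem.Int.mod_eq_emod_of_pos (show (0:Int) < 10 ^ 9 + 7 by norm_num)]
  exact Int.emod_eq_of_lt h0 h1

-- B's main loop: accumulating count(n) mod M over the visited lengths
theorem pvB_fold (og zg minL : Int) (hog : 1 ≤ og) (hzg : 1 ≤ zg) :
    ∀ (L : List Int) (t : Int) (memo : Std.TreeMap Int Int),
      (∀ n ∈ L, 0 ≤ n) → pvBInv og zg memo → 0 ≤ t → t < 10 ^ 9 + 7 →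
      (L.foldl (pvBStep minL og zg) (t, memo)).1
      = PySem.Int.mod (t + ((L.filter (fun n => decide (minL ≤ n))).map (pvf og zg)).sum) (10 ^ 9 + 7) := by
  intro L
  induction L with
  | nil =>
    intro t memo _ _ h0 h1
    simp only [List.foldl_nil, List.filter_nil, List.map_nil, List.sum_nil, add_zero]
    exact (pvMod_self t h0 h1).symm
  | cons n L ihL =>
    intro t memo hpos hInv h0 h1
    have hc := pvBCount_spec og zg hog hzg (n.toNat + 1) memo n (by push_cast; omega) hInv
    simp only [List.foldl_cons, pvBStep]
    by_cases hcond : minL ≤ n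
    · rw [if_pos hcond]
      rw [ihL _ _ (fun x hx => hpos x (List.mem_cons_of_mem _ hx)) hc.2
        (PySem.Int.mod_nonneg _ (by norm_num)) (PySem.Int.mod_lt _ (by norm_num))]
      simp only [if_pos hcond, hc.1, List.filter_cons, decide_eq_true_eq, hcond, if_pos,
        List.map_cons, List.sum_cons]
      rw [pvMod_add_left, add_assoc]
    · rw [if_neg hcond]
      rw [ihL _ _ (fun x hx => hpos x (List.mem_cons_of_mem _ hx)) hc.2 h0 h1]
      simp [List.filter_cons, hcond]


-- ---- A side: the dp array after processing indices below m ----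
def pvAh (og zg m : Int) (j : Nat) : Int :=
  if (j : Int) < m then pvf og zg j else (if j = 0 then 1 else 0)

-- list-world shadows of the Array helpers in port A (used only by the proofs; bridged below)
def pvAGetL (xs : List Int) (i : Int) : Int :=
  let j : Int := if i < 0 then (xs.length : Int) + i else i
  xs.getD j.toNat 0

def pvASetL (xs : List Int) (i : Int) (v : Int) : List Int :=
  let j : Int := if i < 0 then (xs.length : Int) + i else i
  if 0 ≤ j ∧ j < (xs.length : Int) then xs.set j.toNat v else xs

def pvAStepL (oneGroup zeroGroup M : Int) (dp : List Int) (i : Int) : List Int :=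
  let dp1 := if oneGroup ≤ i then
      pvASetL dp i (PySem.Int.mod (pvAGetL dp i + pvAGetL dp (i - oneGroup)) M)
    else dp
  if zeroGroup ≤ i then
    pvASetL dp1 i (PySem.Int.mod (pvAGetL dp1 i + pvAGetL dp1 (i - zeroGroup)) M)
  else dp1

theorem pv_getD_map_range (f : Nat → Int) (N : Nat) (i : Int) (h0 : 0 ≤ i) (h1 : i < (N : Int)) :
    pvAGetL ((List.range N).map f) i = f i.toNat := by
  unfold pvAGetL
  rw [if_neg (by omega)]
  have hk : i.toNat < N := by omega
  rw [List.getD_eq_getElem?_getD, List.getElem?_map]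
  simp [List.getElem?_range, hk]

theorem pv_set_map_range (f : Nat → Int) (N k : Nat) (v : Int) (hk : k < N) :
    ((List.range N).map f).set k v = (List.range N).map (fun (j : Nat) => if j = k then v else f j) := by
  apply List.ext_getElem
  · simp
  · intro i hi hi'
    simp only [List.getElem_set, List.getElem_map, List.getElem_range]
    simp only [List.length_set, List.length_map, List.length_range] at hi
    rcases eq_or_ne k i with h | h
    · simp [h]
    · simp [h, Ne.symm h]

theorem pvASetL_map_range (f : Nat → Int) (N : Nat) (i v : Int) (h0 : 0 ≤ i) (h1 : i < (N : Int)) :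
    pvASetL ((List.range N).map f) i v = (List.range N).map (fun (j : Nat) => if (j : Int) = i then v else f j) := by
  unfold pvASetL
  have hnot : ¬ i < 0 := by omega
  have hlen : (((List.range N).map f).length : Int) = (N : Int) := by simp
  simp only [if_neg hnot, hlen]
  rw [if_pos ⟨h0, h1⟩]
  rw [pv_set_map_range f N i.toNat v (by omega)]
  apply List.map_congr_left
  intro j _
  rcases eq_or_ne (j : Int) i with h | h
  · rw [if_pos (by omega), if_pos h]
  · rw [if_neg (by omega), if_neg h]

-- dp after `dp[0] = 1`
theorem pvA_dp1 (maxL : Int) (hmax : 0 ≤ maxL) :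
    pvASetL (List.replicate (maxL + 1).toNat (0 : Int)) 0 1
      = (List.range (maxL + 1).toNat).map (fun (j : Nat) => if j = 0 then (1:Int) else 0) := by
  have hrepl : List.replicate (maxL + 1).toNat (0 : Int)
      = (List.range (maxL + 1).toNat).map (fun (_ : Nat) => (0 : Int)) := by
    simp [List.map_const']
  rw [hrepl, pvASetL_map_range _ _ 0 1 le_rfl (by omega)]
  apply List.map_congr_left
  intro j _
  rcases eq_or_ne j 0 with h | h
  · simp [h]
  · simp [h, show ((j : Int) ≠ 0) by omega]

-- one iteration of A's loop advances the characterisation from m to m + 1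
theorem pvAStepL_map (og zg maxL : Int) (hog : 1 ≤ og) (hzg : 1 ≤ zg) (hmax : 0 ≤ maxL)
    (m : Int) (hlo : min og zg ≤ m) (hm : m ≤ maxL) :
    pvAStepL og zg (10 ^ 9 + 7) ((List.range (maxL + 1).toNat).map (pvAh og zg m)) m
      = (List.range (maxL + 1).toNat).map (pvAh og zg (m + 1)) := by
  have h1m : 1 ≤ m := le_trans (le_min hog hzg) hlo
  have hN : ((maxL + 1).toNat : Int) = maxL + 1 := by omega
  have hmN : m < ((maxL + 1).toNat : Int) := by omega
  have hself : pvAGetL ((List.range (maxL + 1).toNat).map (pvAh og zg m)) m = 0 := by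
    rw [pv_getD_map_range _ _ m (by omega) hmN]
    simp only [pvAh]
    rw [if_neg (by omega), if_neg (by omega)]
  have hext : (fun (j : Nat) => if (j : Int) = m then pvf og zg m else pvAh og zg m j) = pvAh og zg (m + 1) := by
    funext j
    rcases eq_or_ne (j : Int) m with h | h
    · rw [if_pos h]
      simp only [pvAh]
      rw [if_pos (by omega), h]
    · rw [if_neg h]
      simp only [pvAh]
      rcases lt_or_ge (j : Int) m with h2 | h2
      · rw [if_pos h2, if_pos (by omega)]
      · rw [if_neg (by omega), if_neg (by omega), if_neg (by omega)]
  unfold pvAStepL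
  by_cases hzgm : zg ≤ m
  · by_cases hogm : og ≤ m
    · -- both recurrences fire
      rw [if_pos hogm, hself,
        pv_getD_map_range _ _ (m - og) (by omega) (by omega),
        pvASetL_map_range _ _ m _ (by omega) hmN, if_pos hzgm]
      rw [pv_getD_map_range _ _ m (by omega) hmN,
        pv_getD_map_range _ _ (m - zg) (by omega) (by omega)]
      rw [if_pos (show ((m.toNat : Int)) = m by omega),
        if_neg (show ¬ ((m - zg).toNat : Int) = m by omega)]
      have hhog : pvAh og zg m (m - og).toNat = pvf og zg (m - og) := by
        simp only [pvAh]
        rw [if_pos (by omega)]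
        congr 1
        omega
      have hhzg : pvAh og zg m (m - zg).toNat = pvf og zg (m - zg) := by
        simp only [pvAh]
        rw [if_pos (by omega)]
        congr 1
        omega
      rw [hhog, hhzg, pvASetL_map_range _ _ m _ (by omega) hmN]
      rw [show (0 : Int) + pvf og zg (m - og) = pvf og zg (m - og) by ring,
        pvMod_self _ (pvf_bounds og zg (m - og) hog hzg).1 (pvf_bounds og zg (m - og) hog hzg).2,
        ← pvf_rec og zg m hog hzg (by omega), ← hext]
      apply List.map_congr_left
      intro j _
      rcases eq_or_ne (j : Int) m with h | h
      · rw [if_pos h, if_pos h]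
      · rw [if_neg h, if_neg h, if_neg h]
    · -- only the zeroGroup recurrence fires
      rw [if_neg hogm, if_pos hzgm, hself,
        pv_getD_map_range _ _ (m - zg) (by omega) (by omega)]
      have hhzg : pvAh og zg m (m - zg).toNat = pvf og zg (m - zg) := by
        simp only [pvAh]
        rw [if_pos (by omega)]
        congr 1
        omega
      rw [hhzg, pvASetL_map_range _ _ m _ (by omega) hmN]
      have hv : (0 : Int) + pvf og zg (m - zg) = pvf og zg (m - og) + pvf og zg (m - zg) := by
        rw [pvf_neg og zg (m - og) (by omega)]
      rw [hv, ← pvf_rec og zg m hog hzg (by omega), hext]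
  · -- only the oneGroup recurrence fires
    have hogm : og ≤ m := by rcases min_cases og zg with ⟨h1, _⟩ | ⟨h1, _⟩ <;> omega
    rw [if_pos hogm, hself,
      pv_getD_map_range _ _ (m - og) (by omega) (by omega),
      pvASetL_map_range _ _ m _ (by omega) hmN, if_neg hzgm]
    have hhog : pvAh og zg m (m - og).toNat = pvf og zg (m - og) := by
      simp only [pvAh]
      rw [if_pos (by omega)]
      congr 1
      omega
    rw [hhog]
    have hv : (0 : Int) + pvf og zg (m - og) = pvf og zg (m - og) + pvf og zg (m - zg) := by
      rw [pvf_neg og zg (m - zg) (by omega)]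
      ring
    rw [hv, ← pvf_rec og zg m hog hzg (by omega), hext]

theorem pvA_loop (og zg maxL : Int) (hog : 1 ≤ og) (hzg : 1 ≤ zg) (hmax : 0 ≤ maxL) :
    ∀ k : Nat, min og zg + (k : Int) ≤ maxL + 1 →
      (PySem.List.pyRange (min og zg) (min og zg + (k : Int)) 1).foldl (pvAStepL og zg (10 ^ 9 + 7))
          ((List.range (maxL + 1).toNat).map (pvAh og zg (min og zg)))
        = (List.range (maxL + 1).toNat).map (pvAh og zg (min og zg + (k : Int))) := by
  intro k
  induction k with
  | zero =>
    intro _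
    rw [PySem.List.pyRange_one_eq_nil (by omega)]
    simp
  | succ k ih =>
    intro hk
    have hk' : min og zg + (k : Int) ≤ maxL + 1 := by push_cast at hk ⊢; omega
    rw [show (min og zg + ((k : Nat) + 1 : Nat) : Int) = (min og zg + (k : Int)) + 1 by push_cast; ring,
      PySem.List.pyRange_one_succ_right (by omega), List.foldl_append, ih hk',
      List.foldl_cons, List.foldl_nil,
      pvAStepL_map og zg maxL hog hzg hmax _ (by omega) (by push_cast at hk; omega)]

-- for j below min og zg the recurrence value coincides with the initial array
theorem pvf_init (og zg : Int) (hog : 1 ≤ og) (hzg : 1 ≤ zg) (j : Nat) (h : (j : Int) < min og zg) :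
    pvf og zg j = if j = 0 then 1 else 0 := by
  rcases eq_or_ne j 0 with h0 | h0
  · simp [h0, pvf_zero]
  · rw [if_neg h0, pvf_rec og zg j hog hzg (by omega),
      pvf_neg og zg _ (by rcases min_cases og zg with ⟨h1, _⟩ | ⟨h1, _⟩ <;> omega),
      pvf_neg og zg _ (by rcases min_cases og zg with ⟨h1, _⟩ | ⟨h1, _⟩ <;> omega)]
    rw [show ((0:Int) + 0) = 0 by ring, pvMod_self 0 le_rfl (by norm_num)]

-- A's dp array after the whole loop holds the recurrence values
theorem pvA_dp (og zg maxL : Int) (hog : 1 ≤ og) (hzg : 1 ≤ zg) (hmax : 0 ≤ maxL) :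
    (PySem.List.pyRange (min og zg) (maxL + 1) 1).foldl (pvAStepL og zg (10 ^ 9 + 7))
        (pvASetL (List.replicate (maxL + 1).toNat (0 : Int)) 0 1)
      = (List.range (maxL + 1).toNat).map (fun (j : Nat) => pvf og zg j) := by
  have hinit : (List.range (maxL + 1).toNat).map (fun (j : Nat) => if j = 0 then (1:Int) else 0)
      = (List.range (maxL + 1).toNat).map (pvAh og zg (min og zg)) := by
    apply List.map_congr_left
    intro j hj
    simp only [pvAh]
    have h1lo : 1 ≤ min og zg := le_min hog hzg
    rcases lt_or_ge (j : Int) (min og zg) with h | h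
    · rw [if_pos h, pvf_init og zg hog hzg j h]
    · rw [if_neg (by omega), if_neg (by omega)]
  rw [pvA_dp1 maxL hmax, hinit]
  by_cases hle : min og zg ≤ maxL + 1
  · have hk : min og zg + (((maxL + 1 - min og zg).toNat : Nat) : Int) = maxL + 1 := by omega
    have := pvA_loop og zg maxL hog hzg hmax (maxL + 1 - min og zg).toNat (by omega)
    rw [hk] at this
    rw [this]
    apply List.map_congr_left
    intro j hj
    have hjlt : j < (maxL + 1).toNat := List.mem_range.mp hj
    simp only [pvAh]
    rw [if_pos (by omega)]
  · rw [PySem.List.pyRange_one_eq_nil (by omega), List.foldl_nil]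
    apply List.map_congr_left
    intro j hj
    have hjlt : j < (maxL + 1).toNat := List.mem_range.mp hj
    simp only [pvAh]
    rw [if_pos (by omega)]

-- filtering range by a lower bound is dropping a prefix
theorem pv_range_filter_drop (N k : Nat) :
    (List.range N).filter (fun (j : Nat) => decide (k ≤ j)) = (List.range N).drop k := by
  induction N with
  | zero => simp
  | succ N ih =>
    rw [List.range_succ, List.filter_append, ih]
    by_cases hk : k ≤ N
    · rw [List.drop_append_of_le_length (by simpa using hk)]
      simp [hk]
    · rw [List.drop_eq_nil_of_le (by simp; omega)]
      rw [List.drop_eq_nil_of_le (by simp; omega)]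
      simp [hk]


-- ---- bridging the Array port to its list-world shadow ----
theorem pvAGetD_toList (xs : Array Int) (n : Nat) (d : Int) : xs.getD n d = xs.toList.getD n d := by
  unfold Array.getD
  split
  · rename_i h
    rw [List.getD_eq_getElem?_getD, Array.getElem?_toList, Array.getElem?_eq_getElem h]
    rfl
  · rename_i h
    rw [List.getD_eq_getElem?_getD, Array.getElem?_toList, Array.getElem?_eq_none (by omega)]
    rfl

theorem pvAGet_toList (xs : Array Int) (i : Int) : pvAGet xs i = pvAGetL xs.toList i := by
  simp only [pvAGet, pvAGetL, Array.length_toList]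
  exact pvAGetD_toList xs _ 0

theorem pvASet_toList (xs : Array Int) (i v : Int) : (pvASet xs i v).toList = pvASetL xs.toList i v := by
  simp only [pvASet, pvASetL, Array.length_toList]
  split_ifs <;> first | exact Array.toList_setIfInBounds | rfl

theorem pvAStep_toList (og zg M : Int) (dp : Array Int) (i : Int) :
    (pvAStep og zg M dp i).toList = pvAStepL og zg M dp.toList i := by
  unfold pvAStep pvAStepL
  by_cases h1 : og ≤ i
  · rw [if_pos h1, if_pos h1]
    by_cases h2 : zg ≤ i
    · rw [if_pos h2, if_pos h2]
      simp only [pvASet_toList, pvAGet_toList]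
    · rw [if_neg h2, if_neg h2]
      simp only [pvASet_toList, pvAGet_toList]
  · rw [if_neg h1, if_neg h1]
    by_cases h2 : zg ≤ i
    · rw [if_pos h2, if_pos h2]
      simp only [pvASet_toList, pvAGet_toList]
    · rw [if_neg h2, if_neg h2]

theorem pvAFold_toList (og zg M : Int) (L : List Int) (dp : Array Int) :
    (L.foldl (pvAStep og zg M) dp).toList = L.foldl (pvAStepL og zg M) dp.toList := by
  induction L generalizing dp with
  | nil => rfl
  | cons i L ih => rw [List.foldl_cons, List.foldl_cons, ih, pvAStep_toList]

-- ===== VERDICT =====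
theorem goodBinaryStrings_spec : Claim_unchanged_goodBinaryStrings := by
  intro minL maxL og zg hdom hpre hnd
  obtain ⟨hmax, hog, hzg⟩ := hpre
  unfold D_goodBinaryStrings at hnd
  unfold goodBinaryStrings goodBinaryStrings_alt
  dsimp only
  rw [pvAFold_toList, pvASet_toList, Array.toList_replicate]
  rw [pvA_dp og zg maxL hog hzg hmax]
  have hempty : pvBInv og zg (∅ : Std.TreeMap Int Int) := by
    intro m v h
    simp at h
  have hB := pvB_fold og zg minL hog hzg (PySem.List.pyRange 0 (maxL + 1) 1) 0 (∅ : Std.TreeMap Int Int)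
    (fun n hn => ((PySem.List.mem_pyRange_one.mp hn).1)) hempty le_rfl (by norm_num)
  rw [hB, zero_add]
  have hN : (((maxL + 1).toNat : Nat) : Int) = maxL + 1 := by omega
  have hrange : PySem.List.pyRange 0 (maxL + 1) 1
      = (List.range (maxL + 1).toNat).map (fun (k : Nat) => (k : Int)) := by
    rw [PySem.List.pyRange_one]
    simp
  rw [hrange, List.filter_map, List.map_map]
  congr 1
  by_cases hm : 0 ≤ minL
  · -- minLength ≥ 0: A's slice is an honest drop
    rw [PySem.List.slice_from _ hm]
    have hfc : (List.range (maxL + 1).toNat).filter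
          ((fun n => decide (minL ≤ n)) ∘ (fun (k : Nat) => (k : Int)))
        = (List.range (maxL + 1).toNat).filter (fun (j : Nat) => decide (minL.toNat ≤ j)) := by
      apply List.filter_congr
      intro j _
      simp only [Function.comp]
      rcases le_or_gt minL (j : Int) with h | h
      · rw [decide_eq_true h, decide_eq_true (by omega)]
      · rw [decide_eq_false (by omega), decide_eq_false (by omega)]
    rw [hfc, pv_range_filter_drop, ← List.map_drop]
    rfl
  · -- ¬ D and minLength < 0 force minLength ≤ -(maxLength+1): the slice is the whole array
    push_neg at hm
    have hlow : minL ≤ -(maxL + 1) := by omega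
    have hall : (List.range (maxL + 1).toNat).filter
          ((fun n => decide (minL ≤ n)) ∘ (fun (k : Nat) => (k : Int)))
        = List.range (maxL + 1).toNat := by
      apply List.filter_eq_self.mpr
      intro j _
      simp only [Function.comp]
      exact decide_eq_true (by omega)
    rw [hall]
    rw [show minL = -((((-minL).toNat : Nat)) : Int) by omega,
      PySem.List.slice_from_neg_natCast _ _ (by omega)]
    have hlen : ((List.range (maxL + 1).toNat).map (fun (j : Nat) => pvf og zg j)).length
        = (maxL + 1).toNat := by simp
    rw [hlen, Nat.sub_eq_zero_of_le (by omega), List.drop_zero]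
    rfl
theorem goodBinaryStrings_changed : Claim_changed_goodBinaryStrings := by
  unfold Claim_changed_goodBinaryStrings; decide
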